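-- pv_equiv track=rewrite | github.com/kevin-heitfeld/geometric-flavor | archive/research/tau_deep_dive.py | modular_cusps
-- ===== SOURCE A (Python) =====
-- def modular_cusps(N):
--     """Number of cusps of Γ₀(N)"""
--     # This is sum over d|N of φ(gcd(d, N/d))
--     # Approximate for our purposes
--     divisors = []
--     for d in range(1, N+1):
--         if N % d == 0:
--             divisors.append(d)
--
--     # Euler totient
--     def phi(n):
--         result = n
--         p = 2
--         while p * p <= n:
--             if n % p == 0:
--                 while n % p == 0:
--                     n //= p
--                 result -= result // p
--             p += 1
--         if n > 1:
--             result -= result // n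
--         return result
--
--     cusps = sum(phi(d) for d in divisors) // N
--     return cusps
-- ===== SOURCE B (Python) =====
-- def modular_cusps(N):
--     """Number of cusps of Γ₀(N)"""
--     # Gauss's identity: sum over d|N of phi(d) equals N, so the quotient is 1
--     # for every positive N; for N < 0 the divisor list is empty and the sum is 0.
--     return 1 if N > 0 else 0
-- ===== Notes on version B (the rewrite author's own statement) =====
-- stated objective: faster
-- what changed: Replaced the divisor enumeration plus trial-division totient sums by the closed form from Gauss's identity sum_{d|N} phi(d) = N: every positive N yields quotient one, every negative N an empty divisor sum hence zero.
-- outside the precondition, e.g. on modular_cusps(0): A raises ZeroDivisionError, B returns 0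
import Mathlib
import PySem

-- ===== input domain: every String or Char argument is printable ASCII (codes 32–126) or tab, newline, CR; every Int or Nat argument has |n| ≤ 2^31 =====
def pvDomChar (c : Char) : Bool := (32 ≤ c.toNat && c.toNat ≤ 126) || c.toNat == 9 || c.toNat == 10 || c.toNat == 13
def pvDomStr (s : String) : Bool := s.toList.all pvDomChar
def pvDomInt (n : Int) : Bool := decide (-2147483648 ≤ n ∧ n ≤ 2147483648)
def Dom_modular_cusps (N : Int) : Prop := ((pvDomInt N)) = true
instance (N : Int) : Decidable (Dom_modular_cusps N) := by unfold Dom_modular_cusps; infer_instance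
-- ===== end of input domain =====

-- B replaces A's divisor enumeration + trial-division totient sums by the closed form
-- from the identity ∑_{d|N} φ(d) = N (objective: faster, O(1) vs O(N√N)).

-- ===== PORT A =====
-- termination measure lemma, cited by pvPhiInner's decreasing_by
theorem pvPhiInner_dec (n p : Int) (h : 2 ≤ p ∧ 1 ≤ n ∧ PySem.Int.mod n p = 0) :
    (PySem.Int.floordiv n p).toNat < n.toNat := by
  obtain ⟨hp, hn, hm⟩ := h
  have h1 : PySem.Int.floordiv n p = n / p := PySem.Int.floordiv_eq_ediv_of_pos (by omega)
  have h2 : n / p < n := by apply Int.ediv_lt_of_lt_mul (by omega); nlinarith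
  have h3 : 0 ≤ n / p := Int.ediv_nonneg (by omega) (by omega)
  simp only [h1]; omega

-- inner 'while n % p == 0: n //= p' of A's phi
def pvPhiInner (n p : Int) : Int :=
  if h : 2 ≤ p ∧ 1 ≤ n ∧ PySem.Int.mod n p = 0 then
    pvPhiInner (PySem.Int.floordiv n p) p
  else n
termination_by n.toNat
decreasing_by exact pvPhiInner_dec n p h

-- pvPhiInner never increases n (cited by the outer loop's decreasing_by)
theorem pvPhiInner_le (n p : Int) : pvPhiInner n p ≤ n := by
  induction n using pvPhiInner.induct p with
  | case1 n h ih =>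
    rw [pvPhiInner, dif_pos h]
    obtain ⟨hp, hn, hm⟩ := h
    have h1 : PySem.Int.floordiv n p = n / p := PySem.Int.floordiv_eq_ediv_of_pos (by omega)
    have h2 : n / p < n := by apply Int.ediv_lt_of_lt_mul (by omega); nlinarith
    omega
  | case2 n h => rw [pvPhiInner, dif_neg h]

-- termination measure lemmas, cited by pvPhiOuter's decreasing_by
theorem pvPhiOuter_dec1 (n p : Int) (h : p * p ≤ n) :
    (pvPhiInner n p - (p + 1) + 1).toNat < (n - p + 1).toNat := by
  have h2 : pvPhiInner n p ≤ n := pvPhiInner_le n p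
  have h3 : p ≤ n := by nlinarith
  omega

theorem pvPhiOuter_dec2 (n p : Int) (h : p * p ≤ n) :
    (n - (p + 1) + 1).toNat < (n - p + 1).toNat := by
  have h3 : p ≤ n := by nlinarith
  omega

-- outer 'while p * p <= n' of A's phi; returns the final (n, result)
def pvPhiOuter (n p result : Int) : Int × Int :=
  if h : p * p ≤ n then
    if PySem.Int.mod n p = 0 then
      pvPhiOuter (pvPhiInner n p) (p + 1) (result - PySem.Int.floordiv result p)
    else
      pvPhiOuter n (p + 1) result
  else (n, result)
termination_by (n - p + 1).toNat
decreasing_by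
  · exact pvPhiOuter_dec1 n p h
  · exact pvPhiOuter_dec2 n p h

-- A's phi
def pvPhi (n : Int) : Int :=
  let r := pvPhiOuter n 2 n
  if 1 < r.1 then r.2 - PySem.Int.floordiv r.2 r.1 else r.2

def modular_cusps (N : Int) : Int :=
  let divisors := (PySem.List.pyRange 1 (N + 1) 1).foldl
    (fun acc d => if PySem.Int.mod N d = 0 then acc ++ [d] else acc) []
  PySem.Int.floordiv (divisors.foldl (fun s d => s + pvPhi d) 0) N

-- ===== PORT B =====
def modular_cusps_alt (N : Int) : Int :=
  if 0 < N then 1 else 0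

-- ===== PRECONDITION & SPEC =====
-- Pre_ excludes only N = 0, where A raises ZeroDivisionError (sum([]) // 0); B returns 0 there.
def Pre_modular_cusps (N : Int) : Prop := N ≠ 0
instance (N : Int) : Decidable (Pre_modular_cusps N) := by unfold Pre_modular_cusps; infer_instance
def pvWitness_modular_cusps : Int := 6

def Spec_modular_cusps (N : Int) (out : Int) : Prop := out = modular_cusps_alt N
instance (N : Int) (out : Int) : Decidable (Spec_modular_cusps N out) := by unfold Spec_modular_cusps; infer_instance

-- ===== CLAIM (what is proved, stated in full; the proofs are below) =====
def Claim_equal_modular_cusps : Prop := ∀ (N : Int), Dom_modular_cusps N → Pre_modular_cusps N → Spec_modular_cusps N (modular_cusps N)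

-- ===== LEMMAS AND PROOFS =====

-- pvPhiInner strips the full power of p from n
theorem pvPhiInner_spec (p : Int) (hp : 2 ≤ p) : ∀ n : Int, 1 ≤ n →
    ∃ k : ℕ, n = p ^ k * pvPhiInner n p ∧ ¬ p ∣ pvPhiInner n p ∧ 1 ≤ pvPhiInner n p := by
  intro n
  induction n using pvPhiInner.induct p with
  | case1 n h ih =>
    intro hn
    obtain ⟨_, _, hm⟩ := h
    have hdvd : p ∣ n := (PySem.Int.mod_eq_zero_iff_dvd n p).mp hm
    have h1 : PySem.Int.floordiv n p = n / p := PySem.Int.floordiv_eq_ediv_of_pos (by omega)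
    have h2 : 1 ≤ n / p := by
      have : p ≤ n := Int.le_of_dvd (by omega) hdvd
      have := Int.ediv_le_ediv (by omega : (0:Int) < p) this
      simpa [Int.ediv_self (by omega : p ≠ 0)] using this
    obtain ⟨k, hk1, hk2, hk3⟩ := ih (by rw [h1]; exact h2)
    refine ⟨k + 1, ?_, ?_, ?_⟩
    · rw [pvPhiInner, dif_pos ⟨by omega, by omega, hm⟩]
      have : n = p * (n / p) := by
        rw [Int.mul_comm]; exact (Int.ediv_mul_cancel hdvd).symm
      calc n = p * (n / p) := this
        _ = p * (p ^ k * pvPhiInner (PySem.Int.floordiv n p) p) := by rw [← h1, ← hk1]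
        _ = p ^ (k+1) * pvPhiInner (PySem.Int.floordiv n p) p := by ring
    · rw [pvPhiInner, dif_pos ⟨by omega, by omega, hm⟩]; exact hk2
    · rw [pvPhiInner, dif_pos ⟨by omega, by omega, hm⟩]; exact hk3
  | case2 n h =>
    intro hn
    rw [pvPhiInner, dif_neg h]
    refine ⟨0, by ring, ?_, hn⟩
    intro hdvd
    exact h ⟨hp, hn, (PySem.Int.mod_eq_zero_iff_dvd n p).mpr hdvd⟩

-- the finishing step of A's phi after the trial-division loop
def pvPhiFinish (r : Int × Int) : Int :=
  if 1 < r.1 then r.2 - PySem.Int.floordiv r.2 r.1 else r.2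

-- loop invariant of the outer trial-division loop: with the processed part c coprime
-- to the remaining cofactor n, the final result is the totient of the original input
theorem pvPhiOuter_spec (n p result : Int) :
    ∀ c : ℕ, 2 ≤ p → 1 ≤ n →
    (∀ q : ℕ, Nat.Prime q → (q : Int) ∣ n → p ≤ q) →
    0 < c → Nat.Coprime c n.toNat →
    result = (c.totient : Int) * n →
    pvPhiFinish (pvPhiOuter n p result) = ((c * n.toNat).totient : Int) := by
  induction n, p, result using pvPhiOuter.induct with
  | case1 n p result hpp hm ih =>
    intro c hp hn hmin hc hcop hres
    -- p divides n, and p is prime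
    have hdvd : p ∣ n := (PySem.Int.mod_eq_zero_iff_dvd n p).mp hm
    have hpn : p = ((p.toNat : ℕ) : Int) := by omega
    have hP : Nat.Prime p.toNat := by
      by_contra hnp
      have h1 : (p.toNat).minFac.Prime := Nat.minFac_prime (by omega)
      have h2 : ((p.toNat).minFac : Int) ∣ p := by
        rw [hpn]; exact_mod_cast Int.natCast_dvd_natCast.mpr (Nat.minFac_dvd _)
      have h3 : p ≤ (p.toNat).minFac := hmin _ h1 (h2.trans hdvd)
      have h4 : (p.toNat).minFac ≤ p.toNat := Nat.minFac_le (by omega)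
      have h5 : (p.toNat).minFac = p.toNat := by omega
      exact hnp (h5 ▸ h1)
    -- strip the full power of p
    obtain ⟨k, hk1, hk2, hk3⟩ := pvPhiInner_spec p hp n hn
    set n2 := pvPhiInner n p with hn2
    have hkpos : 1 ≤ k := by
      rcases Nat.eq_zero_or_pos k with h | h
      · exfalso; apply hk2
        rw [h, pow_zero, one_mul] at hk1
        rw [← hk1]; exact hdvd
      · omega
    -- exact division of result by p
    have hresfac : result = p * ((c.totient : Int) * p ^ (k - 1) * n2) := by
      rw [hres, hk1]
      have : p ^ k = p * p ^ (k - 1) := by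
        conv_lhs => rw [show k = (k-1)+1 by omega]
        ring
      rw [this]; ring
    have hfd : PySem.Int.floordiv result p = (c.totient : Int) * p ^ (k - 1) * n2 := by
      rw [PySem.Int.floordiv_eq_ediv_of_pos (by omega), hresfac,
        Int.mul_ediv_cancel_left _ (by omega : p ≠ 0)]
    -- Nat-side facts
    have hn2c : n2 = ((n2.toNat : ℕ) : Int) := by omega
    have hmn' : n = ((p.toNat ^ k * n2.toNat : ℕ) : Int) := by
      rw [hk1]; conv_lhs => rw [hpn, hn2c]
      push_cast; ring
    have hmn : n.toNat = p.toNat ^ k * n2.toNat := by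
      rw [hmn', Int.toNat_natCast]
    have hpkdvd : p.toNat ^ k ∣ n.toNat := ⟨n2.toNat, hmn⟩
    have hm2dvd : n2.toNat ∣ n.toNat := ⟨p.toNat ^ k, by rw [hmn]; ring⟩
    have hPnd : ¬ p.toNat ∣ n2.toNat := by
      intro hPd
      apply hk2
      rw [hpn, hn2c]
      exact_mod_cast Int.natCast_dvd_natCast.mpr hPd
    have hcopP : Nat.Coprime (p.toNat ^ k) n2.toNat :=
      ((Nat.Prime.coprime_iff_not_dvd hP).mpr hPnd).pow_left k
    have hcop2 : Nat.Coprime c n2.toNat := hcop.coprime_dvd_right hm2dvd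
    have hcopPk : Nat.Coprime c (p.toNat ^ k) := hcop.coprime_dvd_right hpkdvd
    -- step the loop and use the invariant with c * p^k
    rw [pvPhiOuter, dif_pos hpp, if_pos hm]
    have hstep := ih (c * p.toNat ^ k) (by omega) hk3 ?_ ?_ ?_ ?_
    · rw [hstep, mul_assoc, ← hmn]
    · intro q hq hqd
      have h1 : p ≤ q := hmin q hq (hqd.trans ⟨p ^ k, by rw [hk1]; ring⟩)
      have h2 : (q : Int) ≠ p := by
        intro h; exact hk2 (h ▸ hqd)
      omega
    · exact Nat.mul_pos hc (pow_pos (by omega) k)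
    · exact Nat.Coprime.mul_left hcop2 hcopP
    · rw [hfd, hresfac, Nat.totient_mul hcopPk, Nat.totient_prime_pow hP hkpos]
      have h1 : (1 : ℕ) ≤ p.toNat := by omega
      push_cast [Nat.cast_sub h1]
      rw [← hpn]
      have : p ^ k = p * p ^ (k - 1) := by
        conv_lhs => rw [show k = (k-1)+1 by omega]
        ring
      ring
  | case2 n p result hpp hm ih =>
    intro c hp hn hmin hc hcop hres
    rw [pvPhiOuter, dif_pos hpp, if_neg hm]
    apply ih c (by omega) hn _ hc hcop hres
    intro q hq hqd
    have h1 : p ≤ q := hmin q hq hqd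
    have h2 : (q : Int) ≠ p := by
      intro h; apply hm
      exact (PySem.Int.mod_eq_zero_iff_dvd n p).mpr (h ▸ hqd)
    omega
  | case3 n p result hpp =>
    intro c hp hn hmin hc hcop hres
    rw [pvPhiOuter, dif_neg hpp]
    have hnc : ((n.toNat : ℕ) : Int) = n := by omega
    by_cases h1 : 1 < n
    · -- the remaining cofactor is prime
      have hm : n.toNat.Prime := by
        by_contra hnp
        have hq : (n.toNat).minFac.Prime := Nat.minFac_prime (by omega)
        have hqd : ((n.toNat).minFac : Int) ∣ n := by
          rw [← hnc]
          exact_mod_cast Int.natCast_dvd_natCast.mpr (Nat.minFac_dvd _)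
        have h2 : p ≤ (n.toNat).minFac := hmin _ hq hqd
        have h3 : (n.toNat).minFac ^ 2 ≤ n.toNat := Nat.minFac_sq_le_self (by omega) hnp
        have h4 : (((n.toNat).minFac : Int)) ^ 2 ≤ n := by
          rw [← hnc]; exact_mod_cast h3
        nlinarith
      have hfd : PySem.Int.floordiv result n = (c.totient : Int) := by
        rw [hres, PySem.Int.floordiv_eq_ediv_of_pos (by omega),
          Int.mul_ediv_cancel _ (by omega : n ≠ 0)]
      simp only [pvPhiFinish, h1, if_pos]
      rw [hfd, hres, Nat.totient_mul hcop, Nat.totient_prime hm]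
      push_cast [Nat.cast_sub hm.one_le]
      rw [hnc]; ring
    · -- n = 1
      have hn1 : n = 1 := by omega
      simp [pvPhiFinish, hn1, hres]

-- A's phi computes Euler's totient
theorem pvPhi_eq (n : Int) (hn : 1 ≤ n) : pvPhi n = (n.toNat.totient : Int) := by
  have h := pvPhiOuter_spec n 2 n 1 (le_refl 2) hn
    (fun q hq _ => by exact_mod_cast hq.two_le) (by omega)
    (Nat.coprime_one_left _) (by simp)
  simpa [pvPhi, pvPhiFinish] using h

theorem sum_filter_range (M : ℕ) (q : ℕ → Bool) (g : ℕ → Int) :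
    ((((List.range M).filter q).map g)).sum
      = ∑ k ∈ Finset.range M, if q k then g k else 0 := by
  induction M with
  | zero => simp
  | succ m ih =>
    rw [List.range_succ, List.filter_append, List.map_append, List.sum_append,
      Finset.sum_range_succ, ih]
    by_cases h : q m <;> simp [h]

-- Gauss's identity: the divisor-totient sum over 1..M equals M
theorem sum_aux (M : ℕ) :
    (∑ k ∈ Finset.range M, if (1 + k) ∣ M then (((1 + k).totient : ℕ) : Int) else 0)
      = (M : Int) := by
  have h1 : (∑ k ∈ Finset.range M, if (1 + k) ∣ M then (((1 + k).totient : ℕ) : Int) else 0)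
      = ((∑ k ∈ Finset.range M, if (1 + k) ∣ M then (1 + k).totient else 0 : ℕ) : Int) := by
    push_cast; rfl
  rw [h1]
  congr 1
  have h2 : (∑ j ∈ Finset.Ico 1 (M + 1), if j ∣ M then j.totient else 0)
      = ∑ k ∈ Finset.range M, if (1 + k) ∣ M then (1 + k).totient else 0 := by
    rw [Finset.sum_Ico_eq_sum_range]
    simp
  rw [← h2, ← Finset.sum_filter]
  have h3 : Finset.filter (fun j => j ∣ M) (Finset.Ico 1 (M + 1)) = M.divisors := rfl
  rw [h3, Nat.sum_totient]

theorem modular_cusps_eq (N : Int) (hN : N ≠ 0) : modular_cusps N = modular_cusps_alt N := by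
  by_cases hpos : 0 < N
  · -- positive N : divisor sum is N, quotient is 1
    set M := N.toNat with hM
    have hNc : ((M : ℕ) : Int) = N := by omega
    have hsum : ((PySem.List.pyRange 1 (N + 1) 1).foldl
        (fun acc d => if PySem.Int.mod N d = 0 then acc ++ [d] else acc) []).foldl
        (fun s d => s + pvPhi d) 0 = N := by
      rw [PySem.List.foldl_append_ite_eq_filter, List.nil_append,
        PySem.List.foldl_add]
      have hr : N + 1 - 1 = ((M : ℕ) : Int) := by omega
      rw [PySem.List.pyRange_one, hr, Int.toNat_natCast, List.filter_map,
        List.map_map, sum_filter_range, Int.zero_add]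
      simp only [Function.comp_apply]
      rw [show (∑ k ∈ Finset.range M,
            if (decide (PySem.Int.mod N (1 + (k : Int)) = 0)) = true
            then pvPhi (1 + (k : Int)) else 0)
          = ∑ k ∈ Finset.range M, if (1 + k) ∣ M then (((1 + k).totient : ℕ) : Int) else 0
        from Finset.sum_congr rfl fun k _ => by
          have hd : (PySem.Int.mod N (1 + (k : Int)) = 0) ↔ ((1 + k) ∣ M) := by
            rw [PySem.Int.mod_eq_zero_iff_dvd, ← hNc]
            exact_mod_cast Iff.rfl
          have hphi : pvPhi (1 + (k : Int)) = (((1 + k).totient : ℕ) : Int) := by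
            rw [pvPhi_eq _ (by omega), show (1 + (k : Int)).toNat = 1 + k by omega]
          by_cases h : (1 + k) ∣ M <;> simp [hd, h, hphi]]
      rw [← hNc]
      exact sum_aux M
    rw [modular_cusps]
    simp only [hsum]
    rw [PySem.Int.floordiv_eq_ediv_of_pos hpos, Int.ediv_self hN, modular_cusps_alt, if_pos hpos]
  · -- negative N : empty divisor list, 0 // N = 0
    have hneg : N < 0 := by omega
    rw [modular_cusps, PySem.List.pyRange_one_eq_nil (by omega)]
    simp only [List.foldl_nil]
    rw [modular_cusps_alt, if_neg hpos]
    simp [PySem.Int.floordiv]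

-- ===== VERDICT (by name: the statement is the Claim_ definition above) =====
theorem modular_cusps_spec : Claim_equal_modular_cusps := by
  intro N _ hp
  unfold Spec_modular_cusps
  exact modular_cusps_eq N hp
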